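-- pv_equiv track=rewrite | github.com/rawbby/tinape | core/util/gen_macro.py | generate_enumerate
-- ===== SOURCE A (Python) =====
-- def generate_enumerate(n):
--     lines = []
--     lines.append('#define ENUMERATE_0(F)')
--     for i in range(1, n + 1):
--         params = ','.join(f"_{j}" for j in range(i))
--         expanded = ','.join(f"F({j},_{j})" for j in range(i))
--         lines.append(f"#define ENUMERATE_{i}(F,{params}){expanded}")
--     return '\n'.join(lines)
-- ===== SOURCE B (Python) =====
-- def generate_enumerate(n):
--     lines = ['#define ENUMERATE_0(F)']
--     params_parts = []
--     expanded_parts = []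
--     for i in range(1, n + 1):
--         params_parts.append(f"_{i-1}")
--         expanded_parts.append(f"F({i-1},_{i-1})")
--         lines.append(f"#define ENUMERATE_{i}(F,{','.join(params_parts)}){','.join(expanded_parts)}")
--     return '\n'.join(lines)
-- ===== Notes on version B (the rewrite author's own statement) =====
-- stated objective: alternative
-- what changed: Maintains running params/expanded token lists with one append per line instead of rebuilding both range(i) comprehensions from scratch for every line.
import Mathlib
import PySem

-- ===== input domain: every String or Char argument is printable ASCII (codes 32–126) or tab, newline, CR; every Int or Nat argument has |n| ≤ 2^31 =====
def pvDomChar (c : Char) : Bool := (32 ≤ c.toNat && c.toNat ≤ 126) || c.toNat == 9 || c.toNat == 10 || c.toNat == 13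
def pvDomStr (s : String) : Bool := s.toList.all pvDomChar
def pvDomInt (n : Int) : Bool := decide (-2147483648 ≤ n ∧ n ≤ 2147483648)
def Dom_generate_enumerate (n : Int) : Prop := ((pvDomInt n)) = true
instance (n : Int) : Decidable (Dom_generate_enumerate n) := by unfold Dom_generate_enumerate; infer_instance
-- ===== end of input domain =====

-- B keeps running params/expanded token lists (one append per line) instead of
-- rebuilding both range(i) comprehensions for every line; return values proved equal.

-- ===== PORT A =====
def generate_enumerate (n : Int) : String :=
  let lines : List String := ["#define ENUMERATE_0(F)"]
  let lines := (PySem.List.pyRange 1 (n + 1) 1).foldl (fun lines i =>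
    let params := PySem.Str.join "," ((PySem.List.pyRange 0 i 1).map
      (fun j => "_" ++ PySem.Int.toStr j))
    let expanded := PySem.Str.join "," ((PySem.List.pyRange 0 i 1).map
      (fun j => "F(" ++ PySem.Int.toStr j ++ ",_" ++ PySem.Int.toStr j ++ ")"))
    lines ++ ["#define ENUMERATE_" ++ PySem.Int.toStr i ++ "(F," ++ params ++ ")" ++ expanded])
    lines
  PySem.Str.join "\n" lines

-- ===== PORT B =====
def generate_enumerate_alt (n : Int) : String :=
  let st := (PySem.List.pyRange 1 (n + 1) 1).foldl
    (fun (st : List String × List String × List String) i =>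
      let lines := st.1
      let params_parts := st.2.1 ++ ["_" ++ PySem.Int.toStr (i - 1)]
      let expanded_parts := st.2.2 ++
        ["F(" ++ PySem.Int.toStr (i - 1) ++ ",_" ++ PySem.Int.toStr (i - 1) ++ ")"]
      (lines ++ ["#define ENUMERATE_" ++ PySem.Int.toStr i ++ "(F," ++
          PySem.Str.join "," params_parts ++ ")" ++ PySem.Str.join "," expanded_parts],
       params_parts, expanded_parts))
    (["#define ENUMERATE_0(F)"], [], [])
  PySem.Str.join "\n" st.1

-- ===== PRECONDITION & SPEC =====
def Spec_generate_enumerate (n : Int) (out : String) : Prop := out = generate_enumerate_alt n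
instance (n : Int) (out : String) : Decidable (Spec_generate_enumerate n out) := by unfold Spec_generate_enumerate; infer_instance

-- ===== CLAIM (what is proved, stated in full; the proofs are below) =====
def Claim_equal_generate_enumerate : Prop := ∀ (n : Int), Dom_generate_enumerate n → Spec_generate_enumerate n (generate_enumerate n)

-- ===== LEMMAS AND PROOFS =====

def pvStepA (lines : List String) (i : Int) : List String :=
  let params := PySem.Str.join "," ((PySem.List.pyRange 0 i 1).map
    (fun j => "_" ++ PySem.Int.toStr j))
  let expanded := PySem.Str.join "," ((PySem.List.pyRange 0 i 1).map
    (fun j => "F(" ++ PySem.Int.toStr j ++ ",_" ++ PySem.Int.toStr j ++ ")"))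
  lines ++ ["#define ENUMERATE_" ++ PySem.Int.toStr i ++ "(F," ++ params ++ ")" ++ expanded]

def pvStepB (st : List String × List String × List String) (i : Int) :
    List String × List String × List String :=
  let params_parts := st.2.1 ++ ["_" ++ PySem.Int.toStr (i - 1)]
  let expanded_parts := st.2.2 ++
    ["F(" ++ PySem.Int.toStr (i - 1) ++ ",_" ++ PySem.Int.toStr (i - 1) ++ ")"]
  (st.1 ++ ["#define ENUMERATE_" ++ PySem.Int.toStr i ++ "(F," ++
      PySem.Str.join "," params_parts ++ ")" ++ PySem.Str.join "," expanded_parts],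
   params_parts, expanded_parts)

lemma pv_inv (m : Nat) :
    (PySem.List.pyRange 1 ((m : Int) + 1) 1).foldl pvStepB
      (["#define ENUMERATE_0(F)"], [], []) =
    ((PySem.List.pyRange 1 ((m : Int) + 1) 1).foldl pvStepA ["#define ENUMERATE_0(F)"],
     (PySem.List.pyRange 0 (m : Int) 1).map (fun j => "_" ++ PySem.Int.toStr j),
     (PySem.List.pyRange 0 (m : Int) 1).map
       (fun j => "F(" ++ PySem.Int.toStr j ++ ",_" ++ PySem.Int.toStr j ++ ")")) := by
  induction m with
  | zero =>
      simp [PySem.List.pyRange_one_eq_nil (by norm_num : (1 : Int) ≥ 1)]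
  | succ k ih =>
      have h1 : PySem.List.pyRange 1 ((↑(k + 1) : Int) + 1) 1
          = PySem.List.pyRange 1 ((k : Int) + 1) 1 ++ [(k : Int) + 1] := by
        have := PySem.List.pyRange_one_succ_right (a := 1) (b := (k : Int) + 1)
          (by omega)
        push_cast
        convert this using 2
      have h2 : PySem.List.pyRange 0 ((k : Int) + 1) 1
          = PySem.List.pyRange 0 (k : Int) 1 ++ [(k : Int)] := by
        exact PySem.List.pyRange_one_succ_right (a := 0) (b := (k : Int)) (by omega)
      rw [h1, List.foldl_append, List.foldl_append, ih]
      simp only [List.foldl_cons, List.foldl_nil, pvStepB, pvStepA]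
      norm_num [h2]

-- ===== VERDICT (by name: the statement is the Claim_ definition above) =====
theorem generate_enumerate_spec : Claim_equal_generate_enumerate := by
  intro n _
  show generate_enumerate n = generate_enumerate_alt n
  show PySem.Str.join "\n"
      (List.foldl pvStepA ["#define ENUMERATE_0(F)"] (PySem.List.pyRange 1 (n + 1) 1))
    = PySem.Str.join "\n"
      ((List.foldl pvStepB (["#define ENUMERATE_0(F)"], [], [])
        (PySem.List.pyRange 1 (n + 1) 1)).1)
  by_cases hn : n ≤ 0
  · rw [PySem.List.pyRange_one_eq_nil (by omega)]; rfl
  · obtain ⟨m, rfl⟩ : ∃ m : Nat, n = (m : Int) := ⟨n.toNat, (Int.toNat_of_nonneg (by omega)).symm⟩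
    rw [pv_inv m]
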